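-- pv_equiv track=rewrite | github.com/Lavanya-Lakshmanan06/areer-counsellor-chatbot | app1.py | match_quiz
-- ===== SOURCE A (Python) =====
-- def match_quiz(answers):
--     score = {"tech": 0, "design": 0, "farming": 0, "business": 0, "health": 0, "education": 0}
--     for ans in answers:
--         a = ans.lower()
--         if "tech" in a or "ai" in a or "computer" in a:
--             score["tech"] += 1
--         elif "design" in a or "fashion" in a or "style" in a:
--             score["design"] += 1
--         elif "farm" in a or "plant" in a or "nature" in a:
--             score["farming"] += 1
--         elif "business" in a or "sales" in a:
--             score["business"] += 1
--         elif "health" in a or "clinic" in a: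
--             score["health"] += 1
--         elif "education" in a or "teach" in a or "school" in a:
--             score["education"] += 1
--     return max(score, key=score.get)
-- ===== SOURCE B (Python) =====
-- _TABLE = [
--     ("tech", ("tech", "ai", "computer")),
--     ("design", ("design", "fashion", "style")),
--     ("farming", ("farm", "plant", "nature")),
--     ("business", ("business", "sales")),
--     ("health", ("health", "clinic")),
--     ("education", ("education", "teach", "school")),
-- ]
--
--
-- def match_quiz(answers):
--     # Category-major sieve: each category (in priority order) claims and removes
--     # the answers it matches, so later categories never see already-claimed answers.
--     remaining = [ans.lower() for ans in answers]
--     counts = []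
--     for cat, kws in _TABLE:
--         hit = [a for a in remaining if any(kw in a for kw in kws)]
--         counts.append((cat, len(hit)))
--         remaining = [a for a in remaining if not any(kw in a for kw in kws)]
--     best_cat, best_n = counts[0]
--     for cat, n in counts[1:]:
--         if n > best_n:
--             best_cat, best_n = cat, n
--     return best_cat
-- ===== Notes on version B (the rewrite author's own statement) =====
-- stated objective: alternative
-- what changed: Replaced A's answer-major pass with a mutable score dict and six-way if/elif chain by a category-major sieve: each category in priority order filters the remaining answers, claims (and removes) its matches, counting them in staged passes; the winner is picked by a strict-greater scan over the (category, count) list, which preserves A's first-key tie-breaking.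
import Mathlib
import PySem

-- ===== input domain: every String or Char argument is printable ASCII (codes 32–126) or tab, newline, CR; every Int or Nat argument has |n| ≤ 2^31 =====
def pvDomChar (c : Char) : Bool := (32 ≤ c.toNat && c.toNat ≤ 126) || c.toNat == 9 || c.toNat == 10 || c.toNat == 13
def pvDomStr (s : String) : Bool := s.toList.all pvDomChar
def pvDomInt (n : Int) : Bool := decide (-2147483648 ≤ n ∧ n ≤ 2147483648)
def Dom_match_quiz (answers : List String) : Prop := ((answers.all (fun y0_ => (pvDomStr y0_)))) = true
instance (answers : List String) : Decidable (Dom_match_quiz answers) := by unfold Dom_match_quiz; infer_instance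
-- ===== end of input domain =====

-- B replaces A's answer-major pass with a dict and if/elif chain by a category-major
-- sieve: each category in priority order claims and removes its matching answers in
-- staged filter passes, then a strict-greater scan picks the winner (objective: alternative).

-- ===== PORT A =====
-- one loop iteration of A: lowercase the answer, bump the first matching category
def matchStepA (score : PySem.Dict String Int) (ans : String) : PySem.Dict String Int :=
  let a := PySem.Chars.lower ans.toList
  if PySem.Chars.isIn "tech".toList a || PySem.Chars.isIn "ai".toList a || PySem.Chars.isIn "computer".toList a then
    score.insert "tech" (score.getD "tech" 0 + 1)
  else if PySem.Chars.isIn "design".toList a || PySem.Chars.isIn "fashion".toList a || PySem.Chars.isIn "style".toList a then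
    score.insert "design" (score.getD "design" 0 + 1)
  else if PySem.Chars.isIn "farm".toList a || PySem.Chars.isIn "plant".toList a || PySem.Chars.isIn "nature".toList a then
    score.insert "farming" (score.getD "farming" 0 + 1)
  else if PySem.Chars.isIn "business".toList a || PySem.Chars.isIn "sales".toList a then
    score.insert "business" (score.getD "business" 0 + 1)
  else if PySem.Chars.isIn "health".toList a || PySem.Chars.isIn "clinic".toList a then
    score.insert "health" (score.getD "health" 0 + 1)
  else if PySem.Chars.isIn "education".toList a || PySem.Chars.isIn "teach".toList a || PySem.Chars.isIn "school".toList a then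
    score.insert "education" (score.getD "education" 0 + 1)
  else
    score

def match_quiz (answers : List String) : String :=
  let score0 : PySem.Dict String Int :=
    PySem.Dict.ofList [("tech", 0), ("design", 0), ("farming", 0), ("business", 0), ("health", 0), ("education", 0)]
  let score := answers.foldl matchStepA score0
  -- max(score, key=score.get): every key is present, so score.get k is the stored value
  match PySem.List.max? score.keys (fun k => score.getD k 0) with
  | some k => k
  | none => ""   -- unreachable: the dict has six keys

-- ===== PORT B =====
def pvTable : List (String × List String) :=
  [("tech", ["tech", "ai", "computer"]),
   ("design", ["design", "fashion", "style"]),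
   ("farming", ["farm", "plant", "nature"]),
   ("business", ["business", "sales"]),
   ("health", ["health", "clinic"]),
   ("education", ["education", "teach", "school"])]

-- any(kw in a for kw in kws)
def pvMatchCat (kws : List String) (a : List Char) : Bool :=
  kws.any (fun kw => PySem.Chars.isIn kw.toList a)

-- one sieve stage: count this category's hits and drop them from the remaining pool
def sieveStep (st : List (List Char) × List (String × Int)) (p : String × List String) :
    List (List Char) × List (String × Int) :=
  let hit := st.1.filter (fun a => pvMatchCat p.2 a)
  (st.1.filter (fun a => !pvMatchCat p.2 a), st.2 ++ [(p.1, (hit.length : Int))])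

def match_quiz_alt (answers : List String) : String :=
  let remaining := answers.map (fun ans => PySem.Chars.lower ans.toList)
  let counts := (pvTable.foldl sieveStep (remaining, [])).2
  match counts with
  | [] => ""   -- unreachable: the table is nonempty
  | (c0, n0) :: rest =>
      (rest.foldl (fun (b : String × Int) (p : String × Int) => if p.2 > b.2 then p else b) (c0, n0)).1

-- ===== PRECONDITION & SPEC =====
def Spec_match_quiz (answers : List String) (out : String) : Prop := out = match_quiz_alt answers
instance (answers : List String) (out : String) : Decidable (Spec_match_quiz answers out) := by unfold Spec_match_quiz; infer_instance

-- ===== CLAIM (what is proved, stated in full; the proofs are below) =====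
def Claim_equal_match_quiz : Prop := ∀ (answers : List String), Dom_match_quiz answers → Spec_match_quiz answers (match_quiz answers)

-- ===== LEMMAS AND PROOFS =====

-- proof-side characterisation of where one answer lands: the first matching category
def pvClassify (a : List Char) : Option String :=
  (pvTable.find? (fun p => pvMatchCat p.2 a)).map Prod.fst

-- A's loop body rewritten through the classifier
lemma matchStepA_eq_classify (score : PySem.Dict String Int) (ans : String) :
    matchStepA score ans =
      match pvClassify (PySem.Chars.lower ans.toList) with
      | some c => score.insert c (score.getD c 0 + 1)
      | none => score := by
  simp only [matchStepA, pvClassify, pvTable, pvMatchCat, List.find?, List.any_cons, List.any_nil,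
    Bool.or_false, Bool.or_assoc]
  cases PySem.Chars.isIn "tech".toList (PySem.Chars.lower ans.toList) <;>
  cases PySem.Chars.isIn "ai".toList (PySem.Chars.lower ans.toList) <;>
  cases PySem.Chars.isIn "computer".toList (PySem.Chars.lower ans.toList) <;>
  simp only [Bool.false_or, Bool.true_or, Bool.or_true, if_true, Option.map_some] <;>
  try rfl
  all_goals (
  cases PySem.Chars.isIn "design".toList (PySem.Chars.lower ans.toList) <;>
  cases PySem.Chars.isIn "fashion".toList (PySem.Chars.lower ans.toList) <;>
  cases PySem.Chars.isIn "style".toList (PySem.Chars.lower ans.toList) <;>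
  simp only [Bool.false_or, Bool.true_or, Bool.or_true, if_true, Option.map_some] <;>
  try rfl)
  all_goals (
  cases PySem.Chars.isIn "farm".toList (PySem.Chars.lower ans.toList) <;>
  cases PySem.Chars.isIn "plant".toList (PySem.Chars.lower ans.toList) <;>
  cases PySem.Chars.isIn "nature".toList (PySem.Chars.lower ans.toList) <;>
  simp only [Bool.false_or, Bool.true_or, Bool.or_true, if_true, Option.map_some] <;>
  try rfl)
  all_goals (
  cases PySem.Chars.isIn "business".toList (PySem.Chars.lower ans.toList) <;>
  cases PySem.Chars.isIn "sales".toList (PySem.Chars.lower ans.toList) <;>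
  simp only [Bool.false_or, Bool.true_or, Bool.or_true, if_true, Option.map_some] <;>
  try rfl)
  all_goals (
  cases PySem.Chars.isIn "health".toList (PySem.Chars.lower ans.toList) <;>
  cases PySem.Chars.isIn "clinic".toList (PySem.Chars.lower ans.toList) <;>
  simp only [Bool.false_or, Bool.true_or, Bool.or_true, if_true, Option.map_some] <;>
  try rfl)
  all_goals (
  cases PySem.Chars.isIn "education".toList (PySem.Chars.lower ans.toList) <;>
  cases PySem.Chars.isIn "teach".toList (PySem.Chars.lower ans.toList) <;>
  cases PySem.Chars.isIn "school".toList (PySem.Chars.lower ans.toList) <;>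
  simp only [Bool.false_or, Bool.true_or, Bool.or_true, if_true, Option.map_some] <;>
  try rfl)

lemma keys_matchStepA (score : PySem.Dict String Int) (ans : String)
    (h : score.keys = pvTable.map Prod.fst) : (matchStepA score ans).keys = pvTable.map Prod.fst := by
  rw [matchStepA_eq_classify]
  cases hc : pvClassify (PySem.Chars.lower ans.toList) with
  | none => exact h
  | some c =>
      have hmem : c ∈ pvTable.map Prod.fst := by
        rcases hp : pvTable.find? (fun p => pvMatchCat p.2 (PySem.Chars.lower ans.toList)) with _ | p
        · simp [pvClassify, hp] at hc
        · have hmem' := List.mem_of_find?_eq_some hp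
          simp only [pvClassify, hp, Option.map_some, Option.some.injEq] at hc
          subst hc
          exact List.mem_map_of_mem hmem'
      have hcontains : score.contains c = true := by
        rw [PySem.Dict.contains_iff_mem_keys, h]; exact hmem
      simp only [PySem.Dict.keys_insert_of_contains score _ hcontains, h]

lemma getD_foldl (l : List String) (score : PySem.Dict String Int)
    (h : score.keys = pvTable.map Prod.fst) :
    (l.foldl matchStepA score).keys = pvTable.map Prod.fst ∧
    ∀ c : String, (l.foldl matchStepA score).getD c 0 =
      score.getD c 0 + ((l.map (fun ans => pvClassify (PySem.Chars.lower ans.toList))).count (some c) : Int) := by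
  induction l generalizing score with
  | nil => simpa using h
  | cons x t ih =>
      have hk := keys_matchStepA score x h
      obtain ⟨hk', hv⟩ := ih (matchStepA score x) hk
      refine ⟨hk', fun c => ?_⟩
      rw [List.foldl_cons, hv c, List.map_cons, List.count_cons]
      rw [matchStepA_eq_classify]
      cases hc : pvClassify (PySem.Chars.lower x.toList) with
      | none => simp
      | some b =>
          by_cases hbc : b = c
          · subst hbc
            simp
            ring
          · have hne : c ≠ b := fun h' => hbc h'.symm
            simp [PySem.Dict.getD_insert, hne, hbc]

lemma getD_score0 (c : String) :
    (PySem.Dict.ofList [("tech", (0:Int)), ("design", 0), ("farming", 0), ("business", 0), ("health", 0), ("education", 0)]).getD c 0 = 0 := by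
  have h : PySem.Dict.ofList [("tech", (0:Int)), ("design", 0), ("farming", 0), ("business", 0), ("health", 0), ("education", 0)] = PySem.Dict.mk [("tech", (0:Int)), ("design", 0), ("farming", 0), ("business", 0), ("health", 0), ("education", 0)] := by decide
  rw [h]
  simp [PySem.Dict.getD_eq_get?_getD, PySem.Dict.get?_mk_cons]
  split_ifs <;> rfl

-- B's selection scan is A's first-maximum fold
lemma sel_scan (rest : List String) (f : String → Int) (m : String) :
    some ((rest.map (fun c => (c, f c))).foldl
        (fun (b : String × Int) (p : String × Int) => if p.2 > b.2 then p else b) (m, f m)).1 =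
      PySem.List.max? (m :: rest) f := by
  unfold PySem.List.max?
  rw [List.foldl_cons]
  induction rest generalizing m with
  | nil => rfl
  | cons x t ih =>
      simp only [List.map_cons, List.foldl_cons]
      by_cases hlt : f m < f x
      · simp only [gt_iff_lt, if_pos hlt]; exact ih x
      · simp only [gt_iff_lt, if_neg hlt]; exact ih m

lemma max?_congr_aux {α : Type} (xs : List α) (f g : α → Int) (acc : Option α)
    (hacc : ∀ m, acc = some m → f m = g m) (h : ∀ x ∈ xs, f x = g x) :
    xs.foldl (fun acc x => match acc with
      | none => some x
      | some m => if f m < f x then some x else some m) acc =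
    xs.foldl (fun acc x => match acc with
      | none => some x
      | some m => if g m < g x then some x else some m) acc := by
  induction xs generalizing acc with
  | nil => rfl
  | cons x t ih =>
      simp only [List.foldl_cons]
      have hx : f x = g x := h x List.mem_cons_self
      have h' : ∀ y ∈ t, f y = g y := fun y hy => h y (List.mem_cons_of_mem x hy)
      cases acc with
      | none =>
          exact ih (some x) (by intro m hm; cases hm; exact hx) h'
      | some m =>
          dsimp only
          rw [hacc m rfl, hx]
          by_cases hlt : g m < g x
          · simp only [if_pos hlt]
            exact ih (some x) (by intro m' hm'; cases hm'; exact hx) h'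
          · simp only [if_neg hlt]
            exact ih (some m) (by intro m' hm'; cases hm'; exact hacc m rfl) h'

lemma max?_congr {α : Type} (xs : List α) (f g : α → Int) (h : ∀ x ∈ xs, f x = g x) :
    PySem.List.max? xs f = PySem.List.max? xs g := by
  unfold PySem.List.max?
  exact max?_congr_aux xs f g none (by simp) h

-- each sieve count is the number of answers the classifier sends to that category
lemma sieve_counts (L : List (List Char)) :
    (pvTable.foldl sieveStep (L, [])).2 =
      (pvTable.map Prod.fst).map
        (fun c => (c, ((L.map pvClassify).count (some c) : Int))) := by
  simp only [pvTable, List.foldl_cons, List.foldl_nil, sieveStep, List.map_cons, List.map_nil,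
    List.nil_append, List.cons_append, List.count_eq_countP, List.countP_map,
    List.filter_filter, List.cons.injEq, Prod.mk.injEq, and_true]
  refine ⟨?_, ?_, ?_, ?_, ?_, ?_⟩ <;>
  · refine ⟨trivial, ?_⟩
    rw [List.countP_eq_length_filter]
    refine congrArg Nat.cast (congrArg List.length (List.filter_congr ?_))
    intro a _
    cases h1 : pvMatchCat ["tech", "ai", "computer"] a <;>
    cases h2 : pvMatchCat ["design", "fashion", "style"] a <;>
    cases h3 : pvMatchCat ["farm", "plant", "nature"] a <;>
    cases h4 : pvMatchCat ["business", "sales"] a <;>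
    cases h5 : pvMatchCat ["health", "clinic"] a <;>
    cases h6 : pvMatchCat ["education", "teach", "school"] a <;>
    simp [pvClassify, pvTable, List.find?, h1, h2, h3, h4, h5, h6]

-- ===== VERDICT (by name: the statement is the Claim_ definition above) =====
theorem match_quiz_spec : Claim_equal_match_quiz := by
  intro answers _
  unfold Spec_match_quiz match_quiz match_quiz_alt
  obtain ⟨hk, hv⟩ := getD_foldl answers
    (PySem.Dict.ofList [("tech", 0), ("design", 0), ("farming", 0), ("business", 0), ("health", 0), ("education", 0)])
    (by decide)
  dsimp only
  rw [hk, sieve_counts]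
  rw [max?_congr _ _
    (fun c => (((answers.map (fun ans => PySem.Chars.lower ans.toList)).map pvClassify).count (some c) : Int))
    (fun c _ => by rw [hv c, getD_score0, zero_add, List.map_map]; rfl)]
  simp only [pvTable, List.map_cons, List.map_nil]
  rw [← sel_scan ["design", "farming", "business", "health", "education"]
    (fun c => (((answers.map (fun ans => PySem.Chars.lower ans.toList)).map pvClassify).count (some c) : Int)) "tech"]
  simp only [List.map_cons, List.map_nil]
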